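-- pv_equiv track=rewrite | github.com/Pramod-Potti-Krishnan/director_v4.0 | src/utils/variant_catalog.py | get_series_type
-- ===== SOURCE A (Python) =====
-- from typing import Dict, List, Optional, Any
-- from typing import Tuple
--
-- def get_series_type(variant_id: str) -> Tuple[Optional[str], Optional[str]]:
--     """
--     Extract series type and layout position from variant_id suffix.
--
--     This is the CORE utility for the unified variant system. The variant_id
--     suffix determines which API endpoint and parameters to use.
--
--     Args:
--         variant_id: Full variant identifier (e.g., "grid_2x2_centered_c1", "sequential_3col_i1")
--
--     Returns:
--         Tuple of (series_type, layout_position):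
--         - ("C1", None) for C1 content variants
--         - ("I", "1"|"2"|"3"|"4") for I-series image+text variants
--         - ("V", "1") for future V-series
--         - ("S", "1") for future S-series
--         - (None, None) if suffix not recognized
--
--     Examples:
--         >>> get_series_type("grid_2x2_centered_c1")
--         ("C1", None)
--         >>> get_series_type("sequential_3col_i1")
--         ("I", "1")
--         >>> get_series_type("comparison_2col_i4")
--         ("I", "4")
--         >>> get_series_type("unknown_variant")
--         (None, None)
--     """
--     if not variant_id:
--         return (None, None)
--
--     # Check I-series suffixes first (i1, i2, i3, i4)
--     for i in ['1', '2', '3', '4']: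
--         if variant_id.endswith(f'_i{i}'):
--             return ('I', i)
--
--     # Check C1 suffix
--     if variant_id.endswith('_c1'):
--         return ('C1', None)
--
--     # Future: V-series, S-series
--     if variant_id.endswith('_v1'):
--         return ('V', '1')
--     if variant_id.endswith('_s1'):
--         return ('S', '1')
--
--     return (None, None)
-- ===== SOURCE B (Python) =====
-- _SUFFIX_TABLE = {
--     '_i1': ('I', '1'),
--     '_i2': ('I', '2'),
--     '_i3': ('I', '3'),
--     '_i4': ('I', '4'),
--     '_c1': ('C1', None),
--     '_v1': ('V', '1'),
--     '_s1': ('S', '1'),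
-- }
--
-- def get_series_type(variant_id):
--     return _SUFFIX_TABLE.get(variant_id[-3:], (None, None))
-- ===== Notes on version B (the rewrite author's own statement) =====
-- stated objective: idiomatic
-- what changed: Replaces the loop plus sequential endswith branch chain with a single precomputed dict lookup keyed by the last three characters (all recognised suffixes have length 3 and are mutually exclusive).
import Mathlib
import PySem

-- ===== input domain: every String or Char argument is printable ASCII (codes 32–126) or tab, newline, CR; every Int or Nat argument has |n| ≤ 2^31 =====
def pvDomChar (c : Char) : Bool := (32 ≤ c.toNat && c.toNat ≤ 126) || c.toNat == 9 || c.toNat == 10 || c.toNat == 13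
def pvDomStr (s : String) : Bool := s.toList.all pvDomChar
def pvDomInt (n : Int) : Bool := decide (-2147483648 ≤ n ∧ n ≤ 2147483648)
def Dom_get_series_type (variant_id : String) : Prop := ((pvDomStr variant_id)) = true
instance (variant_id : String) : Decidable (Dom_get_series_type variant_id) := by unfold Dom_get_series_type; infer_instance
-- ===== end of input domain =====

-- B replaces A's loop + endswith branch chain with one dict lookup keyed by the
-- last three characters (idiomatic; all recognised suffixes have length 3).

-- ===== PORT A =====
-- the 'for i in ['1','2','3','4']' loop, returning some result on early return
def iSeriesLoop (variant_id : String) : List String → Option (Option String × Option String)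
  | [] => none
  | i :: rest =>
    if PySem.Str.endswith variant_id ("_i" ++ i) then some (some "I", some i)
    else iSeriesLoop variant_id rest

def get_series_type (variant_id : String) : Option String × Option String :=
  if variant_id = "" then (none, none)
  else
    match iSeriesLoop variant_id ["1", "2", "3", "4"] with
    | some r => r
    | none =>
      if PySem.Str.endswith variant_id "_c1" then (some "C1", none)
      else if PySem.Str.endswith variant_id "_v1" then (some "V", some "1")
      else if PySem.Str.endswith variant_id "_s1" then (some "S", some "1")
      else (none, none)

-- ===== PORT B =====
def suffixTable : PySem.Dict String (Option String × Option String) :=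
  PySem.Dict.ofList
    [("_i1", (some "I", some "1")), ("_i2", (some "I", some "2")),
     ("_i3", (some "I", some "3")), ("_i4", (some "I", some "4")),
     ("_c1", (some "C1", none)), ("_v1", (some "V", some "1")),
     ("_s1", (some "S", some "1"))]

def get_series_type_alt (variant_id : String) : Option String × Option String :=
  suffixTable.getD (PySem.Str.slice variant_id (some (-3)) none) (none, none)

-- ===== PRECONDITION & SPEC =====
def Spec_get_series_type (variant_id : String) (out : Option String × Option String) : Prop := out = get_series_type_alt variant_id
instance (variant_id : String) (out : Option String × Option String) : Decidable (Spec_get_series_type variant_id out) := by unfold Spec_get_series_type; infer_instance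

-- ===== CLAIM (what is proved, stated in full; the proofs are below) =====
def Claim_equal_get_series_type : Prop := ∀ (variant_id : String), Dom_get_series_type variant_id → Spec_get_series_type variant_id (get_series_type variant_id)

-- ===== LEMMAS AND PROOFS =====

-- A 3-character suffix test is equality with the last-three-characters slice.
theorem endswith_eq_drop3 (cs p : List Char) (hp : p.length = 3) :
    PySem.Chars.endswith cs p = decide (cs.drop (cs.length - 3) = p) := by
  rcases h : decide (cs.drop (cs.length - 3) = p) with _ | _
  · simp only [decide_eq_false_iff_not] at h
    by_contra hne
    have he : PySem.Chars.endswith cs p = true := by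
      cases hb : PySem.Chars.endswith cs p
      · exact absurd hb hne
      · rfl
    rw [PySem.Chars.endswith_iff] at he
    obtain ⟨t, ht⟩ := he
    apply h
    subst ht
    simp [List.length_append, hp]
  · simp only [decide_eq_true_eq] at h
    rw [PySem.Chars.endswith_iff]
    exact h ▸ List.drop_suffix _ _

theorem key_toList (s : String) :
    (PySem.Str.slice s (some (-3)) none).toList = s.toList.drop (s.toList.length - 3) := by
  rw [PySem.Str.toList_slice, PySem.Chars.slice_eq_listSlice]
  exact PySem.List.slice_from_neg_ofNat _ 3 (by omega)

-- ===== VERDICT (by name: the statement is the Claim_ definition above) =====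
theorem get_series_type_spec : Claim_equal_get_series_type := by
  intro s _
  unfold Spec_get_series_type
  simp only [get_series_type, get_series_type_alt, iSeriesLoop, suffixTable]
  have hkey := key_toList s
  set key := PySem.Str.slice s (some (-3)) none with hk
  have hs : ∀ p : String, p.toList.length = 3 →
      PySem.Str.endswith s p = decide (key = p) := by
    intro p hp
    rw [PySem.Str.endswith_eq, endswith_eq_drop3 _ _ hp, ← hkey]
    simp [String.ext_iff]
  simp only [show ("_i" ++ "1" : String) = "_i1" by decide, show ("_i" ++ "2" : String) = "_i2" by decide,
    show ("_i" ++ "3" : String) = "_i3" by decide, show ("_i" ++ "4" : String) = "_i4" by decide]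
  rw [hs "_i1" (by decide), hs "_i2" (by decide), hs "_i3" (by decide), hs "_i4" (by decide),
    hs "_c1" (by decide), hs "_v1" (by decide), hs "_s1" (by decide)]
  by_cases hns : s = ""
  · subst hns; rfl
  · rw [if_neg hns]
    have htab : PySem.Dict.ofList
      [("_i1", ((some "I" : Option String), (some "1" : Option String))), ("_i2", (some "I", some "2")),
       ("_i3", (some "I", some "3")), ("_i4", (some "I", some "4")),
       ("_c1", (some "C1", none)), ("_v1", (some "V", some "1")),
       ("_s1", (some "S", some "1"))] = PySem.Dict.mk
      [("_i1", (some "I", some "1")), ("_i2", (some "I", some "2")),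
       ("_i3", (some "I", some "3")), ("_i4", (some "I", some "4")),
       ("_c1", (some "C1", none)), ("_v1", (some "V", some "1")),
       ("_s1", (some "S", some "1"))] := by decide
    by_cases h1 : key = "_i1"
    · rw [h1]; decide
    by_cases h2 : key = "_i2"
    · rw [h2]; decide
    by_cases h3 : key = "_i3"
    · rw [h3]; decide
    by_cases h4 : key = "_i4"
    · rw [h4]; decide
    by_cases h5 : key = "_c1"
    · rw [h5]; decide
    by_cases h6 : key = "_v1"
    · rw [h6]; decide
    by_cases h7 : key = "_s1"
    · rw [h7]; decide
    rw [htab]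
    simp [PySem.Dict.getD, PySem.Dict.get?, h1, h2, h3, h4, h5, h6, h7,
      Ne.symm h1, Ne.symm h2, Ne.symm h3, Ne.symm h4, Ne.symm h5, Ne.symm h6, Ne.symm h7]
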